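-- pv_equiv track=rewrite | github.com/arjneal/comp110-22s-workspace | lessons/function_writing_final.py | reverse_multiply
-- ===== SOURCE A (Python) =====
-- def reverse_multiply(x: list[int]) -> list[int]:
--     """Given a list returns the list doubled and in reverse order."""
--     result: list[int] = []
--     i: int = len(x) - 1
--     while i >= 0:
--         x[i] *= 2
--         result.append(x[i])
--         i -= 1
--     return result
-- ===== SOURCE B (Python) =====
-- def reverse_multiply(x: list[int]) -> list[int]:
--     """Given a list returns the list doubled and in reverse order."""
--     x[:] = [v * 2 for v in x]  # same in-place doubling of x that A performs
--     return _rev_segment(x, 0, len(x))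
--
--
-- def _rev_segment(xs: list[int], lo: int, hi: int) -> list[int]:
--     """Reversed copy of xs[lo:hi] by divide and conquer."""
--     if hi - lo == 0:
--         return []
--     if hi - lo == 1:
--         return [xs[lo]]
--     mid = (lo + hi) // 2
--     return _rev_segment(xs, mid, hi) + _rev_segment(xs, lo, mid)
-- ===== Notes on version B (the rewrite author's own statement) =====
-- stated objective: alternative
-- what changed: A interleaves doubling and appending in one backward while-loop; B first doubles every element in one comprehension pass (kept in place, so x is mutated exactly as by A) and then builds the reversed list by a divide-and-conquer recursion that concatenates the reversed right half before the reversed left half.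
import Mathlib
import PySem

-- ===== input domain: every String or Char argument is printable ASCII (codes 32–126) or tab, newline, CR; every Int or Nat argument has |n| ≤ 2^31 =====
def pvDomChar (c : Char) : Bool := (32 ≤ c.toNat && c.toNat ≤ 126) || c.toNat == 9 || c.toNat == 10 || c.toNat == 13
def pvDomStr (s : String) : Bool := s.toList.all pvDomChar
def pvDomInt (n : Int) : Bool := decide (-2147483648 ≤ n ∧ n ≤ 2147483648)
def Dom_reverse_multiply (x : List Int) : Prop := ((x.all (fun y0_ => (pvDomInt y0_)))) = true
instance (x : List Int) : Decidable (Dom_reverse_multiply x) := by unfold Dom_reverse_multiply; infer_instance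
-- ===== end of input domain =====

-- B replaces A's single backward double-and-append while-loop by a forward doubling
-- pass plus a divide-and-conquer reversal; both mutate x in place identically
-- (the equivalence proved is about the return value; B performs the same doubling of x).

-- ===== PORT A =====
-- A's while-loop: i counts down from len(x)-1; each step doubles x[i] and appends it.
-- Mutation of x at index i never affects a later read (indices strictly decrease),
-- so reading the original x is exact.
def pvLoopA (x : List Int) : Nat → List Int → List Int
  | 0, result => result
  | n + 1, result => pvLoopA x n (result ++ [((PySem.List.pyGet? x (n : Int)).getD 0) * 2])

def reverse_multiply (x : List Int) : List Int := pvLoopA x x.length []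

-- ===== PORT B =====
-- _rev_segment: reversed copy of xs[lo:hi] by divide and conquer ((lo+hi)//2 on
-- nonnegative ints = Nat division, exact).
def pvRevSeg (xs : List Int) (lo hi : Nat) : List Int :=
  if hi - lo = 0 then []
  else if hi - lo = 1 then [((PySem.List.pyGet? xs (lo : Int)).getD 0)]
  else
    pvRevSeg xs ((lo + hi) / 2) hi ++ pvRevSeg xs lo ((lo + hi) / 2)
termination_by hi - lo
decreasing_by all_goals omega

-- B: x[:] = [v * 2 for v in x]; return _rev_segment(x, 0, len(x))
def reverse_multiply_alt (x : List Int) : List Int :=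
  let y := x.map (fun v => v * 2)
  pvRevSeg y 0 y.length

-- ===== PRECONDITION & SPEC =====
def Spec_reverse_multiply (x : List Int) (out : List Int) : Prop := out = reverse_multiply_alt x
instance (x : List Int) (out : List Int) : Decidable (Spec_reverse_multiply x out) := by unfold Spec_reverse_multiply; infer_instance

-- ===== CLAIM (what is proved, stated in full; the proofs are below) =====
def Claim_equal_reverse_multiply : Prop := ∀ (x : List Int), Dom_reverse_multiply x → Spec_reverse_multiply x (reverse_multiply x)

-- ===== LEMMAS AND PROOFS =====
theorem pvLoopA_eq (x : List Int) (n : Nat) (hn : n ≤ x.length) (res : List Int) :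
    pvLoopA x n res = res ++ ((x.take n).map (fun v => v * 2)).reverse := by
  induction n generalizing res with
  | zero => simp [pvLoopA]
  | succ n ih =>
    have hlt : n < x.length := hn
    have ht : List.take (n + 1) x = List.take n x ++ [x[n]] := by
      rw [List.take_add_one]; simp [List.getElem?_eq_getElem hlt]
    rw [pvLoopA, ih (Nat.le_of_lt hlt), List.append_assoc]
    congr 1
    rw [ht, List.map_append, List.reverse_append]
    simp [List.getElem?_eq_getElem hlt]

theorem pvRevSeg_eq (xs : List Int) : ∀ (k lo hi : Nat), hi - lo = k → hi ≤ xs.length →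
    pvRevSeg xs lo hi = ((xs.drop lo).take (hi - lo)).reverse := by
  intro k
  induction k using Nat.strong_induction_on with
  | _ k ih =>
    intro lo hi hk hlen
    rw [pvRevSeg]
    by_cases h0 : hi - lo = 0
    · simp [h0]
    · by_cases h1 : hi - lo = 1
      · have hlt : lo < xs.length := by omega
        simp only [h1, if_true]
        rw [PySem.List.pyGet?_natCast]
        simp [List.take_one, List.head?_drop, List.getElem?_eq_getElem hlt]
      · have hm1 : hi - (lo + hi) / 2 < k := by omega
        have hm2 : (lo + hi) / 2 - lo < k := by omega
        simp only [h0, h1, if_false]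
        rw [ih _ hm1 _ _ rfl hlen, ih _ hm2 _ _ rfl (by omega)]
        obtain ⟨m, hm⟩ : ∃ m, (lo + hi) / 2 = m := ⟨_, rfl⟩
        have hlom : lo ≤ m := by omega
        have hmhi : m ≤ hi := by omega
        rw [hm]
        have hsplit : (xs.drop lo).take (hi - lo)
            = (xs.drop lo).take (m - lo) ++ (xs.drop m).take (hi - m) := by
          have heq : hi - lo = (m - lo) + (hi - m) := by omega
          rw [heq, List.take_add, List.drop_drop, Nat.add_sub_cancel' hlom]
        rw [hsplit, List.reverse_append]

-- ===== VERDICT (by name: the statement is the Claim_ definition above) =====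
theorem reverse_multiply_spec : Claim_equal_reverse_multiply := by
  intro x _
  unfold Spec_reverse_multiply reverse_multiply reverse_multiply_alt
  rw [pvLoopA_eq x x.length le_rfl,
    pvRevSeg_eq (x.map (fun v => v * 2)) _ 0 _ rfl (by simp)]
  simp
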